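-- pv_equiv track=rewrite | github.com/cccvt/hand-cnns | src/datasets/gteagazeplus.py | get_repeated_annots
-- ===== SOURCE A (Python) =====
-- from collections import defaultdict
--
-- def get_repeated_annots(annot_lines, repetitions):
--     """
--     Given list of annotations in format [action, objects, begin, end]
--     returns list of (action, objects) tuples for the (action, objects)
--     that appear at least repetitions time
--     """
--     action_labels = [(act, obj) for (act, obj, b, e) in annot_lines]
--     counted_labels = defaultdict(int)
--     for label in action_labels:
--         counted_labels[label] += 1
--     repeated_labels = [label for label, count in counted_labels.items()
--                        if count >= repetitions]
--     return repeated_labels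
-- ===== SOURCE B (Python) =====
-- def get_repeated_annots(annot_lines, repetitions):
--     labels = [(act, obj) for (act, obj, b, e) in annot_lines]
--
--     def go(ls):
--         if not ls:
--             return []
--         head = ls[0]
--         rest = [l for l in ls[1:] if l != head]
--         count = len(ls) - len(rest)
--         tail_out = go(rest)
--         return [head] + tail_out if count >= repetitions else tail_out
--
--     return go(labels)
-- ===== Notes on version B (the rewrite author's own statement) =====
-- stated objective: alternative
-- what changed: Replaces the hash count table with a recursive remove-and-conquer pass: take the first label, delete all its occurrences from the list (the number removed is its count), recurse on the shrunken list; no dictionary or set is maintained.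
import Mathlib
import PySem

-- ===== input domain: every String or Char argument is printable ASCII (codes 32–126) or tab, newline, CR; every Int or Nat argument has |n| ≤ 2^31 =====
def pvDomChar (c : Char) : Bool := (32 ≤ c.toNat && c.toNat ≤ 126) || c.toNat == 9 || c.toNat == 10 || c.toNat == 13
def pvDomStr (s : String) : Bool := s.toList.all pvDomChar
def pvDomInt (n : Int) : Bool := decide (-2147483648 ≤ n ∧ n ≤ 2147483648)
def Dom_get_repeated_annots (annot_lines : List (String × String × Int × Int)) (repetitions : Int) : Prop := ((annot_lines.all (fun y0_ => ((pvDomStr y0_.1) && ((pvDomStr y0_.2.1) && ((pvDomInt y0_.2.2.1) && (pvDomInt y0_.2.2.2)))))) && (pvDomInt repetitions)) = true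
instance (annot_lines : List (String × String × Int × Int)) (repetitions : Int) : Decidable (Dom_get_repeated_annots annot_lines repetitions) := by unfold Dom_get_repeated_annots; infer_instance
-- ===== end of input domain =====

-- B replaces A's hash count table by recursive remove-and-conquer: take the first
-- label, delete all its occurrences (the number removed is its count), recurse
-- on the shrunken list (alternative decomposition, not faster).

-- ===== PORT A =====
def get_repeated_annots (annot_lines : List (String × String × Int × Int)) (repetitions : Int) : List (String × String) :=
  let action_labels := annot_lines.map (fun y => (y.1, y.2.1))
  let counted_labels := action_labels.foldl (fun d label => d.modify label 0 (· + 1)) PySem.Dict.empty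
  (counted_labels.items.filter (fun lc => repetitions ≤ lc.2)).map (·.1)

-- ===== PORT B =====
-- the inner recursive helper 'go' of Source B
def pvGoB (repetitions : Int) : List (String × String) → List (String × String)
  | [] => []
  | head :: tl =>
    let rest := tl.filter (fun l => l ≠ head)
    let count : Int := ((head :: tl).length : Int) - (rest.length : Int)
    let tail_out := pvGoB repetitions rest
    if repetitions ≤ count then head :: tail_out else tail_out
termination_by l => l.length
decreasing_by
  simp only [List.length_cons, List.unattach, List.length_map]
  exact Nat.lt_succ_of_le (le_trans (List.length_filter_le _ _) (by simp))

def get_repeated_annots_alt (annot_lines : List (String × String × Int × Int)) (repetitions : Int) : List (String × String) :=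
  let labels := annot_lines.map (fun y => (y.1, y.2.1))
  pvGoB repetitions labels

-- ===== PRECONDITION & SPEC =====
def Spec_get_repeated_annots (annot_lines : List (String × String × Int × Int)) (repetitions : Int) (out : List (String × String)) : Prop := out = get_repeated_annots_alt annot_lines repetitions
instance (annot_lines : List (String × String × Int × Int)) (repetitions : Int) (out : List (String × String)) : Decidable (Spec_get_repeated_annots annot_lines repetitions out) := by unfold Spec_get_repeated_annots; infer_instance

-- ===== CLAIM (what is proved, stated in full; the proofs are below) =====
def Claim_equal_get_repeated_annots : Prop := ∀ (annot_lines : List (String × String × Int × Int)) (repetitions : Int), Dom_get_repeated_annots annot_lines repetitions → Spec_get_repeated_annots annot_lines repetitions (get_repeated_annots annot_lines repetitions)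

-- ===== LEMMAS AND PROOFS =====

-- ofList commutes with filter
theorem pvOfList_filter {α : Type} [BEq α] [LawfulBEq α] (p : α → Bool) (t : List α) :
    PySem.Set.ofList (t.filter p) = (PySem.Set.ofList t).filter p := by
  induction t with
  | nil => simp [PySem.Set.ofList_nil]
  | cons x xs ih =>
    rw [PySem.Set.ofList_cons, PySem.Set.discard]
    by_cases hx : p x = true
    · rw [List.filter_cons_of_pos hx, PySem.Set.ofList_cons, PySem.Set.discard, ih,
        List.filter_cons_of_pos hx, List.filter_filter, List.filter_filter]
      congr 1
      apply List.filter_congr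
      intro a _
      exact Bool.and_comm _ _
    · have hx' : p x = false := by revert hx; cases p x <;> simp
      rw [List.filter_cons_of_neg hx, ih, List.filter_cons_of_neg hx, List.filter_filter]
      apply List.filter_congr
      intro a _
      by_cases hax : a = x
      · subst hax; simp [hx']
      · simp [hax]

-- count of h in t = number of elements removed by filtering h out
theorem pvCount_filter_len (t : List (String × String)) (h : String × String) :
    t.count h + (t.filter (fun l => decide (l ≠ h))).length = t.length := by
  induction t with
  | nil => simp
  | cons x xs ih =>
    by_cases hx : x = h
    · subst hx
      rw [List.count_cons_self, List.filter_cons_of_neg (by simp)]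
      simp only [List.length_cons]
      omega
    · rw [List.count_cons_of_ne (by simpa using hx), List.filter_cons_of_pos (by simpa using hx)]
      simp only [List.length_cons]
      omega

-- B's helper computes: first occurrences of labels whose total count is ≥ repetitions
theorem pvGoB_eq_aux (reps : Int) : ∀ (n : Nat) (l : List (String × String)), l.length ≤ n →
    pvGoB reps l = (PySem.Set.ofList l).filter (fun y => decide (reps ≤ (l.count y : Int))) := by
  intro n
  induction n with
  | zero =>
    intro l hl
    have : l = [] := List.eq_nil_of_length_eq_zero (Nat.le_zero.mp hl)
    subst this
    simp [pvGoB, PySem.Set.ofList_nil]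
  | succ n ih =>
    intro l hl
    match l with
    | [] => simp [pvGoB, PySem.Set.ofList_nil]
    | h :: t =>
      rw [pvGoB]
      have hrlen : (t.filter (fun l => decide (l ≠ h))).length ≤ n :=
        le_trans (List.length_filter_le _ _) (by simpa using Nat.le_of_succ_le_succ hl)
      have ihr := ih (t.filter (fun l => decide (l ≠ h))) hrlen
      have hpred : (fun y => !y == h) = (fun l : String × String => decide (l ≠ h)) := by
        funext a
        by_cases hah : a = h <;> simp [hah, decide_not]
      have hcons : PySem.Set.ofList (h :: t)
          = h :: PySem.Set.ofList (t.filter (fun l => decide (l ≠ h))) := by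
        rw [PySem.Set.ofList_cons, PySem.Set.discard, hpred, ← pvOfList_filter]
      rw [hcons, List.filter_cons]
      have hlen : t.count h + (t.filter (fun l => decide (l ≠ h))).length = t.length :=
        pvCount_filter_len t h
      have hcnt : ((h :: t).count h : Int)
          = ((h :: t).length : Int) - ((t.filter (fun l => decide (l ≠ h))).length : Int) := by
        rw [List.count_cons_self, List.length_cons]
        push_cast
        omega
      have htail : (PySem.Set.ofList (t.filter (fun l => decide (l ≠ h)))).filter
            (fun y => decide (reps ≤ ((h :: t).count y : Int)))
          = pvGoB reps (t.filter (fun l => decide (l ≠ h))) := by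
        rw [ihr]
        apply List.filter_congr
        intro a ha
        have ha' : a ∈ t.filter (fun l => decide (l ≠ h)) :=
          (PySem.Set.mem_ofList _ a).mp ha
        have hane : a ≠ h := by
          have := List.of_mem_filter ha'
          simpa using this
        have hc : (h :: t).count a = (t.filter (fun l => decide (l ≠ h))).count a := by
          rw [List.count_cons_of_ne (Ne.symm hane),
            List.count_filter (by simpa using hane)]
        rw [hc]
      rw [htail, hcnt]
      split_ifs <;> simp_all <;> omega

theorem pvGoB_eq (reps : Int) (l : List (String × String)) :
    pvGoB reps l = (PySem.Set.ofList l).filter (fun y => decide (reps ≤ (l.count y : Int))) :=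
  pvGoB_eq_aux reps l.length l (Nat.le_refl _)

-- ===== VERDICT (by name: the statement is the Claim_ definition above) =====
theorem get_repeated_annots_spec : Claim_equal_get_repeated_annots := by
  intro annot_lines repetitions _
  unfold Spec_get_repeated_annots get_repeated_annots get_repeated_annots_alt
  dsimp only
  rw [← PySem.Dict.counter_eq_foldl, PySem.Dict.items_counter, List.filter_map, List.map_map,
    pvGoB_eq]
  simp [Function.comp_def]
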